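-- pv_equiv track=rewrite | github.com/981377660LMT/algorithm-study | 1_stack/单调栈/倒序遍历/6157. 二进制字符串重新安排顺序需要的时间.py | secondsToRemoveOccurrences3
-- ===== SOURCE A (Python) =====
-- def secondsToRemoveOccurrences3(s: str) -> int:
--     """https://leetcode.cn/problems/time-needed-to-rearrange-a-binary-string/solution/by-endlesscheng-pq2x/"""
--     # dp[i]表示前i个字符移动所需的秒数
--     # dp[i] = dp[i-1] if s[i] == "0" else max(dp[i-1]+1,preZero)
--     # 注意dp[i]会被前面的1堵住
--     n = len(s)
--     dp, zero = [0] * (n + 1), 0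
--     for i in range(1, n + 1):
--         if s[i - 1] == "0":
--             zero += 1
--             dp[i] = dp[i - 1]
--         elif zero:
--             dp[i] = max(dp[i - 1] + 1, zero)
--     return dp[-1]
-- ===== SOURCE B (Python) =====
-- def secondsToRemoveOccurrences3(s: str) -> int:
--     # Closed form: for each '1' with at least one '0' before it, record the number
--     # of zeros before it; with m such ones, the answer is max(z_i + (m-1-i)).
--     zs = []
--     zero = 0
--     for c in s:
--         if c == "0":
--             zero += 1
--         elif zero:
--             zs.append(zero)
--     m = len(zs)
--     return max((z + (m - 1 - i) for i, z in enumerate(zs)), default=0)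
-- ===== Notes on version B (the rewrite author's own statement) =====
-- stated objective: simpler
-- what changed: Replaced the dp-array recurrence dp[i]=max(dp[i-1]+1,zero) by collecting the zero-prefix counts of the qualifying ones and returning the closed-form max(z_i + (m-1-i)); no dp list is allocated or indexed.
import Mathlib
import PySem

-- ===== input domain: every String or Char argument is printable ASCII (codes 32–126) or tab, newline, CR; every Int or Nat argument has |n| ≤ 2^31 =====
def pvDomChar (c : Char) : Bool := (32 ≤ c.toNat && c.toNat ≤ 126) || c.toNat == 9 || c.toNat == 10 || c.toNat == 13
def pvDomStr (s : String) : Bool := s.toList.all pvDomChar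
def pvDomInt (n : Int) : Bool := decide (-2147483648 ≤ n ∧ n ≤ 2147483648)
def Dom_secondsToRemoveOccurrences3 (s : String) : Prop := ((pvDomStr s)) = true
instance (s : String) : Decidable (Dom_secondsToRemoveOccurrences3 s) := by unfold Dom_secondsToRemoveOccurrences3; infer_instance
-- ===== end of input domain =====

-- B replaces A's DP array and recurrence by a closed-form max over the zero-prefix
-- counts of the qualifying ones (simpler: no dp array); both are proved equal.

-- ===== PORT A =====
-- the loop body of A's 'for i in range(1, n+1)'
def bodyA (s : String) (st : List Int × Int) (i : Int) : List Int × Int :=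
  if PySem.Str.pyGet? s (i - 1) = some '0' then
    (PySem.List.pySetD st.1 i (PySem.List.pyGetD st.1 (i - 1) 0), st.2 + 1)
  else if st.2 ≠ 0 then
    (PySem.List.pySetD st.1 i (max (PySem.List.pyGetD st.1 (i - 1) 0 + 1) st.2), st.2)
  else st

def secondsToRemoveOccurrences3 (s : String) : Int :=
  let n : Int := PySem.Str.len s
  let st := (PySem.List.pyRange 1 (n + 1) 1).foldl (bodyA s) (List.replicate (n + 1).toNat 0, 0)
  PySem.List.pyGetD st.1 (-1) 0

-- ===== PORT B =====
-- the loop body of B's 'for c in s'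
def bodyB (st : List Int × Int) (c : Char) : List Int × Int :=
  if c = '0' then (st.1, st.2 + 1)
  else if st.2 ≠ 0 then (st.1 ++ [st.2], st.2)
  else st

def secondsToRemoveOccurrences3_alt (s : String) : Int :=
  let zs := (s.toList.foldl bodyB ([], 0)).1
  let m : Int := zs.length
  -- Python's max(gen, default=0) ported as a fold from 0: exact here since every term is ≥ 1
  (PySem.List.enumerate zs 0).foldl (fun best p => max best (p.2 + (m - 1 - p.1))) 0

-- ===== PRECONDITION & SPEC =====
def Spec_secondsToRemoveOccurrences3 (s : String) (out : Int) : Prop := out = secondsToRemoveOccurrences3_alt s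
instance (s : String) (out : Int) : Decidable (Spec_secondsToRemoveOccurrences3 s out) := by unfold Spec_secondsToRemoveOccurrences3; infer_instance

-- ===== CLAIM (what is proved, stated in full; the proofs are below) =====
def Claim_equal_secondsToRemoveOccurrences3 : Prop := ∀ (s : String), Dom_secondsToRemoveOccurrences3 s → Spec_secondsToRemoveOccurrences3 s (secondsToRemoveOccurrences3 s)

-- ===== LEMMAS AND PROOFS =====

-- the common functional spec: A's dp recurrence as a recursion over the characters
def pvRun : List Char → Int → Int → Int
  | [], a, _ => a
  | c :: cs, a, zero =>
    if c = '0' then pvRun cs a (zero + 1)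
    else if zero ≠ 0 then pvRun cs (max (a + 1) zero) zero
    else pvRun cs a zero

-- the list of zero-prefix counts at the qualifying ones
def zsF : List Char → Int → List Int
  | [], _ => []
  | c :: cs, zero =>
    if c = '0' then zsF cs (zero + 1)
    else if zero ≠ 0 then zero :: zsF cs zero
    else zsF cs zero

lemma pvRun_eq_foldl (cs : List Char) : ∀ (a zero : Int),
    pvRun cs a zero = (zsF cs zero).foldl (fun a z => max (a + 1) z) a := by
  induction cs with
  | nil => intro a zero; rfl
  | cons c cs ih =>
    intro a zero
    by_cases h0 : c = '0'
    · simp [pvRun, zsF, h0, ih]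
    · by_cases hz : zero ≠ 0 <;> simp [pvRun, zsF, h0, hz, ih]

lemma zsF_pos (cs : List Char) : ∀ (zero : Int), 0 ≤ zero → ∀ z ∈ zsF cs zero, 1 ≤ z := by
  induction cs with
  | nil => intro zero _ z hz; simp [zsF] at hz
  | cons c cs ih =>
    intro zero hzero z hz
    by_cases h0 : c = '0'
    · simp [zsF, h0] at hz; exact ih (zero + 1) (by omega) z hz
    · by_cases hne : zero ≠ 0
      · simp [zsF, h0, hne] at hz
        rcases hz with hz | hz
        · omega
        · exact ih zero hzero z hz
      · simp [zsF, h0, hne] at hz; exact ih zero hzero z hz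

lemma bodyB_foldl (cs : List Char) : ∀ (zs0 : List Int) (zero : Int),
    cs.foldl bodyB (zs0, zero) = (zs0 ++ zsF cs zero, zero + (cs.count '0' : Int)) := by
  induction cs with
  | nil => intro zs0 zero; simp [zsF]
  | cons c cs ih =>
    intro zs0 zero
    by_cases h0 : c = '0'
    · simp [bodyB, zsF, h0, ih]; ring
    · by_cases hz : zero ≠ 0
      · simp [bodyB, zsF, h0, hz, ih]
      · simp [bodyB, zsF, h0, hz, ih]

-- the closed-form max over (index, z) equals the DP fold, for lists of terms ≥ 1
lemma unroll (zs : List Int) : ∀ (m t a b : Int),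
    (∀ z ∈ zs, 1 ≤ z) → 0 ≤ a → t + (zs.length : Int) = m →
    b = (if a = 0 then 0 else a + (zs.length : Int)) →
    (PySem.List.enumerate zs t).foldl (fun best p => max best (p.2 + (m - 1 - p.1))) b
      = zs.foldl (fun a z => max (a + 1) z) a := by
  induction zs with
  | nil =>
    intro m t a b _ ha _ hb
    simp only [PySem.List.enumerate_nil, List.foldl_nil, List.length_nil, Nat.cast_zero,
      add_zero] at hb ⊢
    split_ifs at hb <;> omega
  | cons z zs ih =>
    intro m t a b hpos ha hlen hb
    have hz : 1 ≤ z := hpos z (by simp)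
    simp only [List.length_cons] at hlen hb
    push_cast at hlen hb
    rw [PySem.List.enumerate_cons]
    simp only [List.foldl_cons]
    exact ih m (t + 1) (max (a + 1) z) (max b (z + (m - 1 - t)))
      (fun w hw => hpos w (List.mem_cons_of_mem _ hw)) (by omega)
      (by omega)
      (by split_ifs at hb ⊢ <;> omega)

lemma alt_eq_pvRun (s : String) : secondsToRemoveOccurrences3_alt s = pvRun s.toList 0 0 := by
  unfold secondsToRemoveOccurrences3_alt
  rw [bodyB_foldl]
  simp only [List.nil_append]
  rw [unroll (zsF s.toList 0) _ 0 0 0 (zsF_pos s.toList 0 le_rfl) le_rfl (by ring) (by simp)]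
  rw [pvRun_eq_foldl]

-- getD at the last position of a nonempty list via a negative index
lemma pyGetD_neg_one_getD (xs : List Int) (h : xs ≠ []) :
    PySem.List.pyGetD xs (-1) 0 = xs.getD (xs.length - 1) 0 := by
  have hl : 0 < xs.length := List.length_pos_iff.mpr h
  rw [PySem.List.pyGetD_neg_one (h := h), List.getLast_eq_getElem,
      List.getD_eq_getElem xs 0 (by omega)]

-- the A-loop invariant: once k characters are processed with current value a and zero
-- count zero, running the remaining range leaves pvRun of the remaining characters at slot n
lemma loopA_inv (s : String) : ∀ (rest : List Char) (k : Nat) (dp : List Int) (a zero : Int),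
    k ≤ s.toList.length →
    s.toList.drop k = rest →
    dp.length = s.toList.length + 1 →
    dp.getD k 0 = a →
    (∀ j : Nat, k < j → dp.getD j 0 = 0) →
    0 ≤ zero → (zero = 0 → a = 0) →
    (let fin := (PySem.List.pyRange ((k : Int) + 1) ((s.toList.length : Int) + 1) 1).foldl (bodyA s) (dp, zero)
     fin.1.length = dp.length ∧ fin.1.getD s.toList.length 0 = pvRun rest a zero) := by
  intro rest
  induction rest with
  | nil =>
    intro k dp a zero hkle hdrop hlen hget _ _ hza
    have hk : k = s.toList.length := by
      have h1 := congrArg List.length hdrop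
      rw [List.length_drop, List.length_nil] at h1
      omega
    rw [PySem.List.pyRange_one_eq_nil (by omega)]
    subst hk
    exact ⟨rfl, hget⟩
  | cons c rest ih =>
    intro k dp a zero _ hdrop hlen hget hrest hz hza
    have hk : k < s.toList.length := by
      have h1 := congrArg List.length hdrop
      rw [List.length_drop, List.length_cons] at h1
      omega
    have hc : s.toList[k]? = some c := by
      rw [List.getElem?_eq_getElem (by omega)]
      have h2 : s.toList.drop k = s.toList[k] :: s.toList.drop (k + 1) :=
        List.drop_eq_getElem_cons (by omega)
      rw [hdrop] at h2
      injection h2 with h3 _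
      exact (congrArg some h3).symm
    rw [PySem.List.pyRange_one_cons (by omega)]
    simp only [List.foldl_cons]
    have hgetc : PySem.Str.pyGet? s ((k : Int) + 1 - 1) = some c := by
      simpa using hc
    have hlen' : k + 1 < dp.length := by omega
    by_cases h0 : c = '0'
    · -- zero += 1; dp[k+1] = dp[k]
      have hstep : bodyA s (dp, (zero : Int)) ((k : Int) + 1)
          = (dp.set (k + 1) a, zero + 1) := by
        simp only [bodyA]
        rw [if_pos (by rw [hgetc, h0])]
        have h2 : ((k : Int) + 1 - 1) = ((k : Nat) : Int) := by ring
        have h1 : ((k : Int) + 1) = ((k + 1 : Nat) : Int) := by push_cast; ring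
        rw [h2, h1, PySem.List.pySetD_natCast, PySem.List.pyGetD_natCast, hget]
      rw [hstep]
      have h1 : ((k : Int) + 1) = (((k + 1 : Nat) : Int)) := by push_cast; ring
      rw [h1]
      have := ih (k + 1) (dp.set (k + 1) a) a (zero + 1) (by omega)
        (by rw [← List.drop_drop, hdrop]; rfl)
        (by simpa using hlen)
        (by rw [List.getD_eq_getElem _ _ (by simpa using hlen'), List.getElem_set_self])
        (fun j hj => by
          rw [List.getD_eq_getElem?_getD, List.getElem?_set_ne (by omega),
              ← List.getD_eq_getElem?_getD]
          exact hrest j (by omega))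
        (by omega) (by omega)
      simp only [List.length_set] at this
      simpa [pvRun, h0] using this
    · by_cases hzz : zero ≠ 0
      · -- dp[k+1] = max(dp[k]+1, zero)
        have hstep : bodyA s (dp, (zero : Int)) ((k : Int) + 1)
            = (dp.set (k + 1) (max (a + 1) zero), zero) := by
          simp only [bodyA]
          rw [if_neg (by rw [hgetc]; simp [h0]), if_pos hzz]
          have h2 : ((k : Int) + 1 - 1) = ((k : Nat) : Int) := by ring
          have h1 : ((k : Int) + 1) = ((k + 1 : Nat) : Int) := by push_cast; ring
          rw [h2, h1, PySem.List.pySetD_natCast, PySem.List.pyGetD_natCast, hget]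
        rw [hstep]
        have h1 : ((k : Int) + 1) = (((k + 1 : Nat) : Int)) := by push_cast; ring
        rw [h1]
        have := ih (k + 1) (dp.set (k + 1) (max (a + 1) zero)) (max (a + 1) zero) zero (by omega)
          (by rw [← List.drop_drop, hdrop]; rfl)
          (by simpa using hlen)
          (by rw [List.getD_eq_getElem _ _ (by simpa using hlen'), List.getElem_set_self])
          (fun j hj => by
            rw [List.getD_eq_getElem?_getD, List.getElem?_set_ne (by omega),
                ← List.getD_eq_getElem?_getD]
            exact hrest j (by omega))
          hz (by intro h; exact absurd h hzz)
        simp only [List.length_set] at this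
        simpa [pvRun, h0, hzz] using this
      · -- state unchanged; dp[k+1] stays 0 = a
        have hstep : bodyA s (dp, (zero : Int)) ((k : Int) + 1) = (dp, zero) := by
          simp only [bodyA]
          rw [if_neg (by rw [hgetc]; simp [h0]), if_neg hzz]
        rw [hstep]
        have h1 : ((k : Int) + 1) = (((k + 1 : Nat) : Int)) := by push_cast; ring
        rw [h1]
        have ha0 : a = 0 := hza (by omega)
        have := ih (k + 1) dp a zero (by omega)
          (by rw [← List.drop_drop, hdrop]; rfl)
          hlen
          (by rw [ha0]; exact hrest (k + 1) (by omega))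
          (fun j hj => hrest j (by omega))
          hz hza
        simpa [pvRun, h0, hzz] using this

-- ===== VERDICT (by name: the statement is the Claim_ definition above) =====
theorem secondsToRemoveOccurrences3_spec : Claim_equal_secondsToRemoveOccurrences3 := by
  intro s _
  unfold Spec_secondsToRemoveOccurrences3
  rw [alt_eq_pvRun]
  unfold secondsToRemoveOccurrences3
  simp only [PySem.Str.len_eq]
  rw [show (((s.toList.length : Int)) + 1).toNat = s.toList.length + 1 by omega]
  have hinv := loopA_inv s s.toList 0 (List.replicate (s.toList.length + 1) 0) 0 0
    (by omega) (by simp) (by simp) (by simp) (fun j _ => by simp) le_rfl (fun _ => rfl)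
  simp only [Nat.cast_zero, zero_add] at hinv
  obtain ⟨hlenf, hvalf⟩ := hinv
  have hne : ((PySem.List.pyRange 1 ((s.toList.length : Int) + 1) 1).foldl (bodyA s)
      (List.replicate (s.toList.length + 1) 0, 0)).1 ≠ [] := by
    intro h
    rw [h] at hlenf
    simp at hlenf
  rw [pyGetD_neg_one_getD _ hne, hlenf]
  simpa using hvalf
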